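-- pv_equiv track=rewrite | github.com/jiyeon2536/Algorithm-Study | 지연(이)/24년 2월 19일/PGS 기능 개발.py | solution
-- ===== SOURCE A (Python) =====
-- import math
--
-- def solution(progresses, speeds):
--     answer = []
--     N = len(progresses)
--
--     stack = []
--     for i in range(N):
--         stack.append(math.ceil((100-progresses[i])/speeds[i]))
--
--     cnt = 1
--     mx = stack[0]
--     for i in range(1,N):
--         if mx<stack[i]:
--             answer.append(cnt)
--             cnt=1
--             mx = stack[i]
--         else:
--             cnt+=1
--     answer.append(cnt)
--
--     return answer
-- ===== SOURCE B (Python) =====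
-- import math
--
-- def solution(progresses, speeds):
--     days = [math.ceil((100 - p) / s) for p, s in zip(progresses, speeds)]
--     cuts = [i for i in range(len(days)) if i == 0 or max(days[:i]) < days[i]]
--     cuts.append(len(days))
--     return [cuts[k + 1] - cuts[k] for k in range(len(cuts) - 1)]
-- ===== Notes on version B (the rewrite author's own statement) =====
-- stated objective: alternative
-- what changed: Replaced A's single-pass running-max counter fold by a staged computation: first find the group-boundary positions (indices whose days value strictly exceeds the maximum of all earlier days, via max over a prefix slice), append the length, then return adjacent differences of consecutive boundaries.
import Mathlib
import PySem

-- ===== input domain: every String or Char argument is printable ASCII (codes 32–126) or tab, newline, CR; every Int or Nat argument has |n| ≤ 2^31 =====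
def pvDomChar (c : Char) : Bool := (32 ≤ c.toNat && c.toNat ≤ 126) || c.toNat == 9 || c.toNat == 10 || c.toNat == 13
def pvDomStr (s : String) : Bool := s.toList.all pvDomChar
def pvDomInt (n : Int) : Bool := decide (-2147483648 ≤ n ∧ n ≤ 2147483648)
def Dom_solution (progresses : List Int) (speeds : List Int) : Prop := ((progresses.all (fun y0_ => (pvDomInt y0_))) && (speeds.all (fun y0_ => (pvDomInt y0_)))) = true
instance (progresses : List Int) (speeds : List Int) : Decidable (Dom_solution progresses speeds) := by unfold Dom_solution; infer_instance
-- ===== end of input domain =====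

-- B replaces A's single-pass running-max counter by a staged computation: it first finds
-- the group-boundary positions (indices that are strict prefix maxima of the days list)
-- and then returns the differences of consecutive boundaries; objective: alternative.


-- ===== PORT A =====
-- math.ceil((100-p)/s) ported as exact integer ceiling division -((-(100-p)) // s):
-- exact on Dom (|ints| ≤ 2^31), where the float quotient's distance to any integer it is
-- not equal to (≥ 1/|s|) exceeds the float rounding error (≤ 2^-21/|s|).
def pyCeil100 (p : Int) (s : Int) : Int := -(PySem.Int.floordiv (-(100 - p)) s)

def solution (progresses : List Int) (speeds : List Int) : List Int :=
  let N : Int := PySem.List.len progresses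
  let stack := (PySem.List.pyRange 0 N 1).map
    (fun i => pyCeil100 (PySem.List.pyGetD progresses i 0) (PySem.List.pyGetD speeds i 0))
  let mx := PySem.List.pyGetD stack 0 0
  let st := (PySem.List.pyRange 1 N 1).foldl
    (fun (acc : List Int × Int × Int) i =>
      if acc.2.2 < PySem.List.pyGetD stack i 0 then
        (acc.1 ++ [acc.2.1], 1, PySem.List.pyGetD stack i 0)
      else (acc.1, acc.2.1 + 1, acc.2.2))
    ([], 1, mx)
  st.1 ++ [st.2.1]

-- ===== PORT B =====
-- Source B line by line: days via zip-comprehension; cuts = indices i of range(len(days)) with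
-- i == 0 or max(days[:i]) < days[i] (Python max(nonempty) = the running-max fold, PySem.List.max?;
-- the .getD 0 default is unreachable, the 'i == 0' disjunct guards it); append len(days);
-- answer = adjacent differences of cuts.
def solution_alt (progresses : List Int) (speeds : List Int) : List Int :=
  let days := List.zipWith (fun p s => pyCeil100 p s) progresses speeds
  let cuts := ((List.range days.length).filter
      (fun i => i == 0 || decide ((PySem.List.max? (days.take i) (fun x => x)).getD 0 < days.getD i 0)))
      ++ [days.length]
  (List.range (cuts.length - 1)).map
    (fun k => ((cuts.getD (k + 1) 0 : Nat) : Int) - ((cuts.getD k 0 : Nat) : Int))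

-- ===== PRECONDITION & SPEC =====
-- Pre_ excludes exactly the inputs where A raises: empty progresses (IndexError at stack[0]),
-- speeds shorter than progresses (IndexError), or a zero speed among the used ones (ZeroDivisionError).
def Pre_solution (progresses : List Int) (speeds : List Int) : Prop :=
  progresses ≠ [] ∧ progresses.length ≤ speeds.length ∧
    ∀ s ∈ speeds.take progresses.length, s ≠ 0
instance (progresses : List Int) (speeds : List Int) : Decidable (Pre_solution progresses speeds) := by unfold Pre_solution; infer_instance

def pvWitness_solution : List Int × List Int := ([93, 30, 55], [1, 30, 5])

def Spec_solution (progresses : List Int) (speeds : List Int) (out : List Int) : Prop := out = solution_alt progresses speeds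
instance (progresses : List Int) (speeds : List Int) (out : List Int) : Decidable (Spec_solution progresses speeds out) := by unfold Spec_solution; infer_instance

-- ===== CLAIM (what is proved, stated in full; the proofs are below) =====
def Claim_equal_solution : Prop := ∀ (progresses : List Int) (speeds : List Int), Dom_solution progresses speeds → Pre_solution progresses speeds → Spec_solution progresses speeds (solution progresses speeds)

-- ===== LEMMAS AND PROOFS =====

-- canonical single-pass grouping both ports are reduced to
def bGroups (leader : Int) (cnt : Int) : List Int → List Int
  | [] => [cnt]
  | x :: xs => if x ≤ leader then bGroups leader (cnt + 1) xs else cnt :: bGroups x 1 xs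

-- A's stack list equals the days list when speeds is long enough
lemma stack_eq_days (progresses speeds : List Int)
    (h : progresses.length ≤ speeds.length) :
    (PySem.List.pyRange 0 (PySem.List.len progresses) 1).map
      (fun i => pyCeil100 (PySem.List.pyGetD progresses i 0) (PySem.List.pyGetD speeds i 0))
      = List.zipWith (fun p s => pyCeil100 p s) progresses speeds := by
  rw [PySem.List.len_eq, PySem.List.pyRange_zero_nat]
  apply List.ext_getElem
  · simp [min_eq_left h]
  · intro k h1 h2
    simp only [List.getElem_map, List.getElem_range, List.getElem_zipWith]
    simp only [List.length_map, List.length_range] at h1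
    rw [PySem.List.pyGetD_natCast, PySem.List.pyGetD_natCast,
        List.getD_eq_getElem _ _ h1, List.getD_eq_getElem _ _ (by omega)]

-- A's fold with (answer, cnt, mx) state equals the canonical grouping recursion
lemma fold_eq_bGroups (l : List Int) : ∀ (ans : List Int) (cnt mx : Int),
    (let st := l.foldl
      (fun (acc : List Int × Int × Int) x =>
        if acc.2.2 < x then (acc.1 ++ [acc.2.1], 1, x) else (acc.1, acc.2.1 + 1, acc.2.2))
      (ans, cnt, mx)
     st.1 ++ [st.2.1]) = ans ++ bGroups mx cnt l := by
  induction l with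
  | nil => intro ans cnt mx; simp [bGroups]
  | cons x xs ih =>
    intro ans cnt mx
    simp only [List.foldl_cons, bGroups]
    by_cases hx : x ≤ mx
    · rw [if_neg (by omega), if_pos hx]
      exact ih ans (cnt + 1) mx
    · rw [if_pos (by omega), if_neg hx]
      rw [ih (ans ++ [cnt]) 1 x, List.append_assoc]
      rfl

-- B-side abbreviations (definitionally what the port computes)
def pMax (l : List Int) : Int := (PySem.List.max? l (fun x => x)).getD 0

def isCut (d : List Int) (i : Nat) : Bool :=
  i == 0 || decide (pMax (d.take i) < d.getD i 0)

def cutsOf (d : List Int) : List Nat := (List.range d.length).filter (isCut d)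

def adjDiffs : List Nat → List Int
  | a :: b :: r => ((b : Int) - (a : Int)) :: adjDiffs (b :: r)
  | _ => []

-- the range/getD adjacent-difference expression of the port is adjDiffs
lemma diffs_expr_eq (l : List Nat) :
    (List.range (l.length - 1)).map
      (fun k => ((l.getD (k + 1) 0 : Nat) : Int) - ((l.getD k 0 : Nat) : Int)) = adjDiffs l := by
  match l with
  | [] => rfl
  | [a] => rfl
  | a :: b :: r =>
    have : (a :: b :: r).length - 1 = ((b :: r).length - 1) + 1 := by simp
    rw [this, List.range_succ_eq_map, List.map_cons, List.map_map]
    show _ :: _ = _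
    congr 1
    rw [← diffs_expr_eq (b :: r)]
    apply List.map_congr_left
    intro k _
    rfl

lemma foldl_max_max (l : List Int) : ∀ a b : Int, l.foldl max (max a b) = max a (l.foldl max b) := by
  induction l with
  | nil => intro a b; rfl
  | cons y ys ih =>
    intro a b
    simp only [List.foldl_cons, max_assoc]
    exact ih a (max b y)

lemma pMax_cons (x : Int) (t : List Int) : pMax (x :: t) = t.foldl max x := by
  simp [pMax, PySem.List.max?_id_cons]

lemma le_pMax (x : Int) (t : List Int) {a : Int} (ha : a ∈ x :: t) : a ≤ pMax (x :: t) := by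
  rw [pMax_cons]
  rw [List.mem_cons] at ha
  rcases ha with rfl | ha
  · exact (PySem.List.le_foldl_max t a).1
  · exact (PySem.List.le_foldl_max t x).2 a ha

lemma pMax_cons_all_le (x : Int) (t : List Int) (h : ∀ a ∈ t, a ≤ x) : pMax (x :: t) = x := by
  rw [pMax_cons]
  induction t with
  | nil => rfl
  | cons y ys ih =>
    simp only [List.foldl_cons]
    rw [max_eq_left (h y (by simp))]
    exact ih (fun a ha => h a (by simp [ha]))

lemma pMax_cons_append_cons (x : Int) (g : List Int) (y : Int) (r : List Int) :
    pMax (x :: (g ++ y :: r)) = max (pMax (x :: g)) (pMax (y :: r)) := by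
  rw [pMax_cons, pMax_cons, pMax_cons, List.foldl_append, List.foldl_cons]
  exact foldl_max_max r (g.foldl max x) y

-- head of the dropWhile part fails the predicate
lemma dropWhile_head_false {p : Int → Bool} : ∀ {t : List Int} {y : Int} {r : List Int},
    t.dropWhile p = y :: r → p y = false := by
  intro t
  induction t with
  | nil => intro y r h; simp [List.dropWhile] at h
  | cons a t ih =>
    intro y r h
    rw [List.dropWhile_cons] at h
    by_cases hp : p a = true
    · rw [if_pos hp] at h; exact ih h
    · rw [if_neg hp] at h
      cases h
      simpa using hp

-- the cut positions of x :: t are 0 followed by the (shifted) cut positions of the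
-- part of t strictly after the first run of elements ≤ x
lemma cutsOf_cons (x : Int) (t : List Int) :
    cutsOf (x :: t) = 0 :: (cutsOf (t.dropWhile (· ≤ x))).map (· + (t.takeWhile (· ≤ x)).length + 1) := by
  set g := t.takeWhile (· ≤ x) with hg
  set r := t.dropWhile (· ≤ x) with hr
  have htgr : t = g ++ r := (List.takeWhile_append_dropWhile).symm
  have hglen : ∀ a ∈ g, a ≤ x := by
    intro a ha
    have := List.mem_takeWhile_imp ha
    simpa using this
  have hlen : (x :: t).length = (g.length + 1) + r.length := by
    simp [htgr]; omega
  unfold cutsOf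
  rw [hlen, List.range_add, List.filter_append]
  have hfirst : (List.range (g.length + 1)).filter (isCut (x :: t)) = [0] := by
    rw [List.range_succ_eq_map, List.filter_cons]
    have h0 : isCut (x :: t) 0 = true := by simp [isCut]
    rw [if_pos h0]
    have hnil : ((List.range g.length).map Nat.succ).filter (isCut (x :: t)) = [] := by
      rw [List.filter_map]
      rw [List.filter_eq_nil_iff.mpr ?_]
      · rfl
      · intro k hk
        simp only [List.mem_range] at hk
        simp only [Function.comp_apply, Nat.succ_eq_add_one]
        have hget : (x :: t).getD (k + 1) 0 = g.getD k 0 := by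
          simp only [htgr, List.getD_cons_succ]
          exact List.getD_append g r 0 k hk
        have hmem : g.getD k 0 ∈ g := by
          rw [List.getD_eq_getElem g 0 hk]
          exact List.getElem_mem hk
        have hle : (x :: t).getD (k + 1) 0 ≤ x := by
          rw [hget]; exact hglen _ hmem
        have hxle : x ≤ pMax ((x :: t).take (k + 1)) := by
          rw [List.take_succ_cons]
          exact le_pMax _ _ (by simp)
        have hfalse : isCut (x :: t) (k + 1) = false := by
          unfold isCut
          rw [Bool.or_eq_false_iff]
          refine ⟨by simp, ?_⟩
          simp only [decide_eq_false_iff_not, not_lt]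
          exact le_trans hle hxle
        intro hcontra
        rw [hfalse] at hcontra
        exact Bool.false_ne_true hcontra
    rw [hnil]
  rw [hfirst, List.singleton_append]
  congr 1
  rw [List.filter_map]
  have hpt : ∀ j ∈ List.range r.length,
      (isCut (x :: t) ∘ (fun j => g.length + 1 + j)) j = isCut r j := by
    intro j hj
    simp only [List.mem_range] at hj
    simp only [Function.comp_apply]
    obtain ⟨y, r', hyr⟩ : ∃ y r', r = y :: r' := by
      cases hrc : r with
      | nil => rw [hrc] at hj; simp at hj
      | cons y r' => exact ⟨y, r', rfl⟩
    have hxy : ¬ (y ≤ x) := by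
      have hdw : t.dropWhile (fun a => decide (a ≤ x)) = y :: r' := by rw [← hr]; exact hyr
      have := dropWhile_head_false hdw
      simpa using this
    have htake : (x :: t).take (g.length + 1 + j) = x :: (g ++ r.take j) := by
      have h1 : g.length + 1 + j = (g.length + j) + 1 := by omega
      rw [htgr, h1, List.take_succ_cons]
      congr 1
      rw [List.take_append, List.take_of_length_le (by omega)]
      have h2 : g.length + j - g.length = j := by omega
      rw [h2]
    have hget : (x :: t).getD (g.length + 1 + j) 0 = r.getD j 0 := by
      have h1 : g.length + 1 + j = (g.length + j) + 1 := by omega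
      rw [h1, List.getD_cons_succ, htgr]
      rw [List.getD_append_right g r 0 (g.length + j) (by omega)]
      congr 1
      omega
    cases j with
    | zero =>
      have hcut : isCut (x :: t) (g.length + 1 + 0) = true := by
        unfold isCut
        rw [Bool.or_eq_true]
        right
        rw [htake, hget]
        simp only [List.take_zero, List.append_nil]
        rw [pMax_cons_all_le x g hglen, hyr]
        simp only [List.getD_cons_zero]
        simp [lt_of_not_ge hxy]
      rw [hcut]
      simp [isCut]
    | succ k =>
      have htk : r.take (k + 1) = y :: r'.take k := by rw [hyr]; rfl
      have hmx : pMax (x :: (g ++ r.take (k + 1))) = pMax (r.take (k + 1)) := by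
        rw [htk, pMax_cons_append_cons, pMax_cons_all_le x g hglen, ← htk]
        apply max_eq_right
        refine le_trans (le_of_lt (lt_of_not_ge hxy)) ?_
        rw [htk]
        exact le_pMax y (r'.take k) (by simp)
      unfold isCut
      rw [htake, hget, hmx]
      congr 1
  rw [List.filter_congr hpt]
  rw [show (List.range r.length).filter (isCut r) = cutsOf r from rfl]
  apply List.map_congr_left
  intro a _
  omega

-- first element of the cut list is 0
lemma cutsOf_head (x : Int) (t : List Int) : ∃ c, cutsOf (x :: t) = 0 :: c := by
  rw [cutsOf_cons]; exact ⟨_, rfl⟩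

lemma adjDiffs_map_add (m : Nat) : ∀ (l : List Nat), adjDiffs (l.map (· + m)) = adjDiffs l := by
  intro l
  match l with
  | [] => rfl
  | [a] => rfl
  | a :: b :: r =>
    have h1 : adjDiffs ((a :: b :: r).map (· + m))
        = (((b + m : Nat) : Int) - ((a + m : Nat) : Int)) :: adjDiffs ((b :: r).map (· + m)) := rfl
    rw [h1, adjDiffs_map_add m (b :: r)]
    show _ = ((b : Int) - (a : Int)) :: adjDiffs (b :: r)
    congr 1
    push_cast
    ring

-- the leader-run split of the canonical grouping: empty remainder …
lemma bGroups_drop_nil (x : Int) : ∀ (l : List Int) (cnt : Int), l.dropWhile (· ≤ x) = [] →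
    bGroups x cnt l = [cnt + (l.takeWhile (· ≤ x)).length] := by
  intro l
  induction l with
  | nil => intro cnt _; simp [bGroups, List.takeWhile]
  | cons a l ih =>
    intro cnt h
    by_cases ha : a ≤ x
    · have hda : (a :: l).dropWhile (· ≤ x) = l.dropWhile (· ≤ x) := by
        rw [List.dropWhile_cons, if_pos (by simpa using ha)]
      have hta : (a :: l).takeWhile (· ≤ x) = a :: l.takeWhile (· ≤ x) := by
        rw [List.takeWhile_cons, if_pos (by simpa using ha)]
      have hb : bGroups x cnt (a :: l) = bGroups x (cnt + 1) l := by
        simp [bGroups, ha]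
      rw [hb, ih (cnt + 1) (by rw [← hda]; exact h), hta]
      congr 1
      simp only [List.length_cons]
      push_cast
      ring
    · exfalso
      have hda : (a :: l).dropWhile (· ≤ x) = a :: l := by
        rw [List.dropWhile_cons, if_neg (by simpa using ha)]
      rw [hda] at h
      exact List.cons_ne_nil a l h

-- … and nonempty remainder
lemma bGroups_drop_cons (x : Int) : ∀ (l : List Int) (cnt : Int) (y : Int) (r' : List Int),
    l.dropWhile (· ≤ x) = y :: r' →
    bGroups x cnt l = (cnt + (l.takeWhile (· ≤ x)).length) :: bGroups y 1 r' := by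
  intro l
  induction l with
  | nil => intro cnt y r' h; simp [List.dropWhile] at h
  | cons a l ih =>
    intro cnt y r' h
    by_cases ha : a ≤ x
    · have hda : (a :: l).dropWhile (· ≤ x) = l.dropWhile (· ≤ x) := by
        rw [List.dropWhile_cons, if_pos (by simpa using ha)]
      have hta : (a :: l).takeWhile (· ≤ x) = a :: l.takeWhile (· ≤ x) := by
        rw [List.takeWhile_cons, if_pos (by simpa using ha)]
      have hb : bGroups x cnt (a :: l) = bGroups x (cnt + 1) l := by
        simp [bGroups, ha]
      rw [hb, ih (cnt + 1) y r' (by rw [← hda]; exact h), hta]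
      congr 1
      simp only [List.length_cons]
      push_cast
      ring
    · have hda : (a :: l).dropWhile (· ≤ x) = a :: l := by
        rw [List.dropWhile_cons, if_neg (by simpa using ha)]
      rw [hda] at h
      cases h
      have hta : (a :: l).takeWhile (· ≤ x) = [] := by
        rw [List.takeWhile_cons, if_neg (by simpa using ha)]
      have hb : bGroups x cnt (a :: l) = cnt :: bGroups a 1 l := by
        simp [bGroups, ha]
      rw [hb, hta]
      simp

-- main correspondence: adjacent differences of (cuts ++ [length]) = canonical grouping
lemma cuts_diffs_eq_bGroups : ∀ (n : Nat) (x : Int) (t : List Int), t.length ≤ n →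
    adjDiffs (cutsOf (x :: t) ++ [(x :: t).length]) = bGroups x 1 t := by
  intro n
  induction n with
  | zero =>
    intro x t ht
    have : t = [] := List.length_eq_zero_iff.mp (by omega)
    subst this
    simp [cutsOf, isCut, List.filter, adjDiffs, bGroups]
  | succ n ih =>
    intro x t ht
    set g := t.takeWhile (· ≤ x) with hg
    set r := t.dropWhile (· ≤ x) with hr
    have htgr : t = g ++ r := (List.takeWhile_append_dropWhile).symm
    have hm : (x :: t).length = (g.length + 1) + r.length := by simp [htgr]; omega
    rw [cutsOf_cons, hm, ← hg, ← hr]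
    have hshift : (cutsOf r).map (· + g.length + 1) ++ [g.length + 1 + r.length]
        = ((cutsOf r) ++ [r.length]).map (· + (g.length + 1)) := by
      rw [List.map_append]
      refine congrArg₂ (· ++ ·) ?_ ?_
      · apply List.map_congr_left; intro a _; omega
      · simp only [List.map_cons, List.map_nil]
        congr 1
        omega
    rw [List.cons_append, hshift]
    cases hrc : r with
    | nil =>
      rw [bGroups_drop_nil x t 1 (by rw [← hr]; exact hrc), ← hg]
      simp only [cutsOf, List.length_nil, List.range_zero, List.filter_nil, List.nil_append,
        List.map_cons, List.map_nil]
      show (((0 + (g.length + 1) : Nat) : Int) - ((0 : Nat) : Int)) :: adjDiffs [(0 : Nat) + (g.length + 1)] = _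
      show (((0 + (g.length + 1) : Nat) : Int) - ((0 : Nat) : Int)) :: ([] : List Int) = _
      congr 1
      push_cast
      ring
    | cons y r' =>
      rw [bGroups_drop_cons x t 1 y r' (by rw [← hr]; exact hrc), ← hg]
      obtain ⟨c, hc⟩ := cutsOf_head y r'
      have hrlen : r'.length ≤ n := by
        have h1 : r.length ≤ t.length := by rw [htgr]; simp
        rw [hrc] at h1
        simp only [List.length_cons] at h1
        omega
      have hih := ih y r' hrlen
      rw [hc]
      rw [show ((0 :: c) ++ [(y :: r').length] : List Nat) = 0 :: (c ++ [(y :: r').length]) from rfl]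
      rw [show ((0 :: (c ++ [(y :: r').length])).map (· + (g.length + 1))
            : List Nat) = (0 + (g.length + 1)) :: ((c ++ [(y :: r').length]).map (· + (g.length + 1))) from rfl]
      show (((0 + (g.length + 1) : Nat) : Int) - ((0 : Nat) : Int))
          :: adjDiffs ((0 + (g.length + 1)) :: ((c ++ [(y :: r').length]).map (· + (g.length + 1)))) = _
      have hrest : ((0 + (g.length + 1)) :: ((c ++ [(y :: r').length]).map (· + (g.length + 1))) : List Nat)
          = ((0 :: (c ++ [(y :: r').length])).map (· + (g.length + 1))) := rfl
      rw [hrest, adjDiffs_map_add]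
      rw [show ((0 :: (c ++ [(y :: r').length])) : List Nat) = (0 :: c) ++ [(y :: r').length] from rfl]
      rw [← hc, hih]
      congr 1
      push_cast
      ring

-- ===== VERDICT (by name: the statement is the Claim_ definition above) =====
theorem solution_spec : Claim_equal_solution := by
  intro progresses speeds _ hpre
  obtain ⟨hne, hlen, _⟩ := hpre
  unfold Spec_solution solution solution_alt
  simp only
  rw [stack_eq_days progresses speeds hlen]
  set days := List.zipWith (fun p s => pyCeil100 p s) progresses speeds with hdays
  have hdl : days.length = progresses.length := by
    simp [hdays, min_eq_left hlen]
  have hN : PySem.List.len progresses = PySem.List.len days := by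
    simp [PySem.List.len_eq, hdl]
  rw [hN, PySem.List.foldl_pyRange_pyGetD days 0
        (fun (acc : List Int × Int × Int) x =>
          if acc.2.2 < x then (acc.1 ++ [acc.2.1], 1, x) else (acc.1, acc.2.1 + 1, acc.2.2))
        ([], 1, PySem.List.pyGetD days 0 0) (by norm_num : (0:Int) ≤ 1)]
  have hA := fold_eq_bGroups (days.drop (1 : Int).toNat) [] 1 (PySem.List.pyGetD days 0 0)
  simp only [List.nil_append] at hA
  rw [hA]
  obtain ⟨x, t, hxt⟩ : ∃ x t, days = x :: t := by
    cases hdc : days with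
    | nil => exfalso; apply hne; rw [← List.length_eq_zero_iff, ← hdl, hdc]; rfl
    | cons x t => exact ⟨x, t, rfl⟩
  rw [hxt]
  have hget0 : PySem.List.pyGetD (x :: t) 0 0 = x := by
    have h0 : ((0 : Nat) : Int) = (0 : Int) := rfl
    rw [← h0, PySem.List.pyGetD_natCast]
    rfl
  have hdrop : (x :: t).drop (1 : Int).toNat = t := rfl
  rw [hget0, hdrop]
  rw [show ((List.range (x :: t).length).filter
      (fun i => i == 0 || decide ((PySem.List.max? ((x :: t).take i) (fun x => x)).getD 0 < (x :: t).getD i 0)))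
      = cutsOf (x :: t) from rfl]
  rw [diffs_expr_eq]
  exact (cuts_diffs_eq_bGroups t.length x t (le_refl _)).symm
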